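-- pv_equiv track=rewrite | github.com/iceSdance/rink | decimal-binary convert.py | list_binary_str_fix_length
-- ===== SOURCE A (Python) =====
-- def list_binary_str_fix_length(d):
--     binary_str = ['0' for _ in range(d)]
--     binary_str_list = [''.join(binary_str)]
--
--     while binary_str != ['1' for _ in range(d)]:
--         for j in range(-1, -(d + 1), -1):
--             binary_str[j] = '01'.strip(binary_str[j])
--             if binary_str[j] == '1':
--                 binary_str_list.append(''.join(binary_str))
--                 break
--             else:
--                 continue
--     return binary_str_list
-- ===== SOURCE B (Python) =====
-- def list_binary_str_fix_length(d):
--     if d <= 0: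
--         return ['']
--     rest = list_binary_str_fix_length(d - 1)
--     return ['0' + r for r in rest] + ['1' + r for r in rest]
-- ===== Notes on version B (the rewrite author's own statement) =====
-- stated objective: simpler
-- what changed: A counts up by mutating a list of bits with a carry inner loop inside a while; B enumerates by recursion on the width, prepending '0' to and then '1' to all (d-1)-bit strings, which yields the same counting order with no mutation or loop.
import Mathlib
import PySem

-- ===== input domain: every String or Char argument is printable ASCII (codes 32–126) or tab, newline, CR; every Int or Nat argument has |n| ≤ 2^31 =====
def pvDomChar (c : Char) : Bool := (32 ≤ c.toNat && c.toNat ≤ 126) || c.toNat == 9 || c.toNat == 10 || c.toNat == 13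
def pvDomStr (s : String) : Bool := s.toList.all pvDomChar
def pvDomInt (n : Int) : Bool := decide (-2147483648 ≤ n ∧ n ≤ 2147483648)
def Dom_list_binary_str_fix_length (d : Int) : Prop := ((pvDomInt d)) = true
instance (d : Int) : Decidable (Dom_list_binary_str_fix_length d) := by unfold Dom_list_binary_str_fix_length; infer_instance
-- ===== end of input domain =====

-- B replaces A's mutate-and-carry counting loop by a recursion on the bit width
-- (prefix '0'-block then '1'-block); objective: simpler.

-- ===== PORT A =====
-- Inner 'for j in range(-1, -(d+1), -1)' walks binary_str from its last element to its
-- first, mutating in place and breaking after the first '0'->'1' flip; ported as a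
-- structural recursion over the REVERSED list (exact for lists of length d), returning
-- the new (reversed) list and whether the break (hence the append) happened.
def lbsInnerRev : List String → List String × Bool
  | [] => ([], false)
  | b :: t =>
    let b' := PySem.Str.stripChars "01" b        -- '01'.strip(binary_str[j])
    if b' = "1" then (b' :: t, true)
    else
      let r := lbsInnerRev t
      (b' :: r.1, r.2)

-- The while loop, with a fuel guard that only makes it total (2^d iterations suffice;
-- the proofs show the fuel is never exhausted).
def lbsLoop (n : Nat) : Nat → List String → List String → List String
  | 0, _, acc => acc
  | fuel + 1, bs, acc =>
    if bs = List.replicate n "1" then acc        -- while binary_str != ['1']*d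
    else
      let r := lbsInnerRev bs.reverse
      let bs' := r.1.reverse
      let acc' := if r.2 then acc ++ [PySem.Str.join "" bs'] else acc
      lbsLoop n fuel bs' acc'

def list_binary_str_fix_length (d : Int) : List String :=
  let n := d.toNat                               -- range(d) has max(d,0) elements
  let binary_str := List.replicate n "0"
  lbsLoop n (2 ^ n) binary_str [PySem.Str.join "" binary_str]

-- ===== PORT B =====
def list_binary_str_fix_length_alt (d : Int) : List String :=
  if d ≤ 0 then [""]
  else
    let rest := list_binary_str_fix_length_alt (d - 1)
    rest.map (fun r => "0" ++ r) ++ rest.map (fun r => "1" ++ r)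
termination_by d.toNat
decreasing_by omega

-- ===== PRECONDITION & SPEC =====
def Spec_list_binary_str_fix_length (d : Int) (out : List String) : Prop := out = list_binary_str_fix_length_alt d
instance (d : Int) (out : List String) : Decidable (Spec_list_binary_str_fix_length d out) := by unfold Spec_list_binary_str_fix_length; infer_instance

-- ===== CLAIM (what is proved, stated in full; the proofs are below) =====
def Claim_equal_list_binary_str_fix_length : Prop := ∀ (d : Int), Dom_list_binary_str_fix_length d → Spec_list_binary_str_fix_length d (list_binary_str_fix_length d)

-- ===== LEMMAS AND PROOFS =====

-- LSB-first binary representation of k on n bits, as the list of "0"/"1" strings.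
def toBinR : Nat → Nat → List String
  | 0, _ => []
  | n + 1, k => (if k % 2 = 1 then "1" else "0") :: toBinR n (k / 2)

-- the string A joins / B builds for value k on n bits
def binS (n k : Nat) : String := PySem.Str.join "" (toBinR n k).reverse

lemma join_empty_cons (x : String) (l : List String) :
    PySem.Str.join "" (x :: l) = x ++ PySem.Str.join "" l := by
  apply String.toList_inj.mp
  cases l with
  | nil => simp [PySem.Chars.join_singleton, PySem.Chars.join_nil]
  | cons y t => simp [PySem.Chars.join_cons_cons]

lemma toBinR_zero (n : Nat) : toBinR n 0 = List.replicate n "0" := by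
  induction n with
  | zero => rfl
  | succ n ih => simp [toBinR, ih, List.replicate]

lemma toBinR_ones (n : Nat) : toBinR n (2 ^ n - 1) = List.replicate n "1" := by
  induction n with
  | zero => rfl
  | succ n ih =>
    have h1 : (2 ^ (n + 1) - 1) % 2 = 1 := by
      have : 1 ≤ 2 ^ (n + 1) := Nat.one_le_two_pow
      omega
    have h2 : (2 ^ (n + 1) - 1) / 2 = 2 ^ n - 1 := by
      have : 2 ^ (n + 1) = 2 * 2 ^ n := by ring
      omega
    simp [toBinR, h1, h2, ih, List.replicate]

lemma toBinR_eq_ones (n k : Nat) (hk : k < 2 ^ n)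
    (h : toBinR n k = List.replicate n "1") : k = 2 ^ n - 1 := by
  induction n generalizing k with
  | zero => simpa using hk
  | succ n ih =>
    simp only [toBinR, List.replicate, List.cons.injEq] at h
    have hb : k % 2 = 1 := by
      by_contra hb
      simp [hb] at h
    have hk2 : k / 2 < 2 ^ n := by
      have : 2 ^ (n + 1) = 2 * 2 ^ n := by ring
      omega
    have := ih (k / 2) hk2 (by simpa [hb] using h.2)
    have h2 : 2 ^ (n + 1) = 2 * 2 ^ n := by ring
    omega

lemma flip0 : PySem.Str.stripChars "01" "0" = "1" := by decide
lemma flip1 : PySem.Str.stripChars "01" "1" = "0" := by decide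

lemma innerRev_toBinR (n k : Nat) (hk : k + 1 < 2 ^ n) :
    lbsInnerRev (toBinR n k) = (toBinR n (k + 1), true) := by
  induction n generalizing k with
  | zero => simp at hk
  | succ n ih =>
    by_cases hb : k % 2 = 1
    · -- odd: flip '1' to '0' and carry
      have hne : ("0" : String) ≠ "1" := by decide
      have hk1 : (k + 1) % 2 = 0 := by omega
      have hk2 : (k + 1) / 2 = k / 2 + 1 := by omega
      have hrec : k / 2 + 1 < 2 ^ n := by
        have : 2 ^ (n + 1) = 2 * 2 ^ n := by ring
        omega
      simp [toBinR, hb, lbsInnerRev, flip1, hne, ih _ hrec, hk1, hk2]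
    · -- even: flip last '0' to '1', break
      have hb0 : k % 2 = 0 := by omega
      have hk1 : (k + 1) % 2 = 1 := by omega
      have hk2 : (k + 1) / 2 = k / 2 := by omega
      simp [toBinR, hb0, hk1, hk2, lbsInnerRev, flip0]

lemma replicate_reverse_eq (n : Nat) (l : List String) :
    l.reverse = List.replicate n "1" ↔ l = List.replicate n "1" := by
  constructor
  · intro h
    have := congrArg List.reverse h
    simpa [List.reverse_replicate] using this
  · intro h; simp [h, List.reverse_replicate]

lemma lbsLoop_spec (n : Nat) : ∀ (fuel k : Nat) (acc : List String),
    k < 2 ^ n → 2 ^ n - 1 - k ≤ fuel →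
    lbsLoop n fuel (toBinR n k).reverse acc
      = acc ++ (List.range' (k + 1) (2 ^ n - 1 - k)).map (binS n) := by
  intro fuel
  induction fuel with
  | zero =>
    intro k acc hk hf
    have : 2 ^ n - 1 - k = 0 := by omega
    simp [lbsLoop, this]
  | succ fuel ih =>
    intro k acc hk hf
    by_cases hend : k = 2 ^ n - 1
    · have hones : (toBinR n k).reverse = List.replicate n "1" :=
        (replicate_reverse_eq n _).mpr (by rw [hend]; exact toBinR_ones n)
      rw [lbsLoop, if_pos hones]
      have : 2 ^ n - 1 - k = 0 := by omega
      simp [this]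
    · have hne : (toBinR n k).reverse ≠ List.replicate n "1" := by
        intro h
        exact hend (toBinR_eq_ones n k hk ((replicate_reverse_eq n _).mp h))
      have hk1 : k + 1 < 2 ^ n := by omega
      rw [lbsLoop]
      simp only [if_neg hne, List.reverse_reverse, innerRev_toBinR n k hk1]
      rw [ih (k + 1) _ hk1 (by omega)]
      have hlen : 2 ^ n - 1 - k = (2 ^ n - 1 - (k + 1)) + 1 := by omega
      rw [hlen, List.range'_succ, List.map_cons]
      simp [binS]

lemma toBinR_low (n k : Nat) (hk : k < 2 ^ n) :
    toBinR (n + 1) k = toBinR n k ++ ["0"] := by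
  induction n generalizing k with
  | zero =>
    interval_cases k
    rfl
  | succ n ih =>
    have hk2 : k / 2 < 2 ^ n := by
      have : 2 ^ (n + 1) = 2 * 2 ^ n := by ring
      omega
    show (if k % 2 = 1 then "1" else "0") :: toBinR (n + 1) (k / 2)
        = ((if k % 2 = 1 then "1" else "0") :: toBinR n (k / 2)) ++ ["0"]
    rw [ih _ hk2]
    simp

lemma toBinR_high (n k : Nat) (hk : k < 2 ^ n) :
    toBinR (n + 1) (k + 2 ^ n) = toBinR n k ++ ["1"] := by
  induction n generalizing k with
  | zero =>
    interval_cases k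
    rfl
  | succ n ih =>
    have hmod : (k + 2 ^ (n + 1)) % 2 = k % 2 := by
      have : 2 ^ (n + 1) = 2 * 2 ^ n := by ring
      omega
    have hdiv : (k + 2 ^ (n + 1)) / 2 = k / 2 + 2 ^ n := by
      have : 2 ^ (n + 1) = 2 * 2 ^ n := by ring
      omega
    have hk2 : k / 2 < 2 ^ n := by
      have : 2 ^ (n + 1) = 2 * 2 ^ n := by ring
      omega
    show (if (k + 2 ^ (n + 1)) % 2 = 1 then "1" else "0") :: toBinR (n + 1) ((k + 2 ^ (n + 1)) / 2)
        = ((if k % 2 = 1 then "1" else "0") :: toBinR n (k / 2)) ++ ["1"]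
    rw [hmod, hdiv, ih _ hk2]
    simp

lemma binS_low (n k : Nat) (hk : k < 2 ^ n) : binS (n + 1) k = "0" ++ binS n k := by
  simp [binS, toBinR_low n k hk, join_empty_cons]

lemma binS_high (n k : Nat) (hk : k < 2 ^ n) :
    binS (n + 1) (2 ^ n + k) = "1" ++ binS n k := by
  rw [Nat.add_comm (2 ^ n) k]
  simp [binS, toBinR_high n k hk, join_empty_cons]

lemma alt_eq (n : Nat) : ∀ d : Int, d.toNat = n →
    list_binary_str_fix_length_alt d = (List.range (2 ^ n)).map (binS n) := by
  induction n with
  | zero =>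
    intro d hd
    have hle : d ≤ 0 := by omega
    rw [list_binary_str_fix_length_alt, if_pos hle]
    decide
  | succ n ih =>
    intro d hd
    have hle : ¬ d ≤ 0 := by omega
    rw [list_binary_str_fix_length_alt, if_neg hle]
    have hrec : (d - 1).toNat = n := by omega
    simp only [ih (d - 1) hrec]
    rw [show (2:ℕ) ^ (n + 1) = 2 ^ n + 2 ^ n from by ring, List.range_add,
      List.map_append, List.map_map, List.map_map, List.map_map]
    congr 1
    · exact List.map_congr_left (fun k hk => by
        simpa using (binS_low n k (List.mem_range.mp hk)).symm)
    · exact List.map_congr_left (fun k hk => by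
        simpa using (binS_high n k (List.mem_range.mp hk)).symm)

lemma a_eq (d : Int) :
    list_binary_str_fix_length d = (List.range (2 ^ d.toNat)).map (binS d.toNat) := by
  have h0 : (List.replicate d.toNat "0" : List String) = (toBinR d.toNat 0).reverse := by
    simp [toBinR_zero, List.reverse_replicate]
  show lbsLoop d.toNat (2 ^ d.toNat) (List.replicate d.toNat "0")
      [PySem.Str.join "" (List.replicate d.toNat "0")] = _
  have hfuel : (2:ℕ) ^ d.toNat - 1 - 0 ≤ 2 ^ d.toNat :=
    le_trans (Nat.sub_le _ _) (Nat.sub_le _ _)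
  rw [h0, lbsLoop_spec d.toNat (2 ^ d.toNat) 0 _ (Nat.two_pow_pos _) hfuel]
  have hpos : 1 ≤ (2:ℕ) ^ d.toNat := Nat.one_le_two_pow
  have key : ∀ m : ℕ, 1 ≤ m → m = (m - 1 - 0) + 1 := by intro m hm; omega
  have hsucc := key _ hpos
  rw [List.range_eq_range', hsucc, List.range'_succ, List.map_cons]
  simp [binS]

-- ===== VERDICT (by name: the statement is the Claim_ definition above) =====
theorem list_binary_str_fix_length_spec : Claim_equal_list_binary_str_fix_length := by
  intro d _
  unfold Spec_list_binary_str_fix_length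
  rw [a_eq d, alt_eq d.toNat d rfl]
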